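-- pv_equiv track=rewrite | github.com/rysweet/amplihack | src/amplihack/adapters/agent_adapter.py | _adapt_context_references
-- ===== SOURCE A (Python) =====
-- def _adapt_context_references(body: str) -> str:
--     """Transform context references to explicit includes."""
--     # Pattern: @.claude/context/FILE.md -> Include @.claude/context/FILE.md
--     # Already explicit references are fine, just ensure "Include" prefix
--
--     # Find lines with @.claude/ that don't start with "Include"
--     lines = body.split('\n')
--     adapted_lines = []
--
--     for line in lines:
--         # Only add "Include" if the line is ONLY the reference (not embedded in text)
--         stripped = line.strip()
--         if stripped.startswith('@.claude/') and not line.strip().startswith('Include @'):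
--             # Add "Include" prefix
--             indent = len(line) - len(line.lstrip())
--             line = ' ' * indent + f"Include {stripped}"
--
--         adapted_lines.append(line)
--
--     return '\n'.join(adapted_lines)
-- ===== SOURCE B (Python) =====
-- def _adapt_context_references(body: str) -> str:
--     """Transform context references to explicit includes."""
--     # Single cursor-driven scan over the raw string: no split into a lines
--     # list, no join of lines; pieces are emitted as the cursor advances.
--     out = []
--     i, n = 0, len(body)
--     while True:
--         # skip the leading whitespace of the current line
--         j = i
--         while j < n and body[j] != '\n' and body[j].isspace():
--             j += 1
--         if body.startswith('@.claude/', j):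
--             # emit normalized indent + 'Include ' + rstripped reference
--             k = j
--             e = j
--             while k < n and body[k] != '\n':
--                 if not body[k].isspace():
--                     e = k + 1
--                 k += 1
--             out.append(' ' * (j - i) + 'Include ' + body[j:e])
--         else:
--             # copy the line verbatim
--             k = j
--             while k < n and body[k] != '\n':
--                 k += 1
--             out.append(body[i:k])
--         if k < n:
--             out.append('\n')
--             i = k + 1
--         else:
--             return ''.join(out)
-- ===== Notes on version B (the rewrite author's own statement) =====
-- stated objective: alternative
-- what changed: Replaces A's split-into-lines / per-line-transform / join pipeline with a single cursor-driven scan over the raw string that never materializes a lines list: the cursor skips leading whitespace, tests the reference pattern at an offset, and emits output pieces (normalized line or verbatim slice) as it advances.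
import Mathlib
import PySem

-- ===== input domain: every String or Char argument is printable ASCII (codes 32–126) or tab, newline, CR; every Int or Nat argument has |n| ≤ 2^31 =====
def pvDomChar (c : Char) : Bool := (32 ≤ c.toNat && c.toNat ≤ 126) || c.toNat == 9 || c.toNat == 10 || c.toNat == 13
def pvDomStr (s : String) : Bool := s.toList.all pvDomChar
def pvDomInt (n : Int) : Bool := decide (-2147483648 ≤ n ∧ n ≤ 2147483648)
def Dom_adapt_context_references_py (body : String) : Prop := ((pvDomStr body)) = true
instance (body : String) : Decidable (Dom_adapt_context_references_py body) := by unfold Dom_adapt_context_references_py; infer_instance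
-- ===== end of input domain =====

-- B replaces A's split-into-lines / per-line loop / join pipeline with a single
-- cursor-driven scan over the raw character stream; the return values agree on every input.

-- ===== PORT A =====
-- one loop iteration of A: strip, check the two startswith conditions, rebuild the line
def pvAdaptLineA (line : List Char) : List Char :=
  let stripped := PySem.Chars.strip line
  if PySem.Chars.startswith stripped ("@.claude/".toList) &&
     !(PySem.Chars.startswith (PySem.Chars.strip line) ("Include @".toList)) then
    let indent := line.length - (PySem.Chars.lstrip line).length
    List.replicate indent ' ' ++ ("Include ".toList) ++ stripped
  else line

def adapt_context_references_py (body : String) : String :=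
  let lines := PySem.Chars.splitOn body.toList ("\n".toList)
  let adapted := lines.foldl (fun acc line => acc ++ [pvAdaptLineA line]) []
  String.ofList (PySem.Chars.join ("\n".toList) adapted)

-- ===== PORT B =====
-- the leading-whitespace loop: while j < n and body[j] != '\n' and body[j].isspace(): j += 1
def pvSkipLead : List Char → Nat
  | [] => 0
  | c :: rest => if c != '\n' && PySem.Chars.isspace c then pvSkipLead rest + 1 else 0

-- the verbatim-copy loop 'while k < n and body[k] != '\n'': the chars before the first
-- newline, and (some rest) iff a newline was found (i.e. k < n at the bottom of B's loop)
def pvTakeLine : List Char → List Char × Option (List Char)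
  | [] => ([], none)
  | c :: rest =>
    if c = '\n' then ([], some rest)
    else
      let (l, r) := pvTakeLine rest
      (c :: l, r)

-- the match-branch loop, additionally tracking e = end of the rstripped content
-- ('if not body[k].isspace(): e = k + 1'), here relative to the loop's start position
def pvTakeLineR : List Char → (List Char × Nat) × Option (List Char)
  | [] => (([], 0), none)
  | c :: rest =>
    if c = '\n' then (([], 0), some rest)
    else
      let ((l, e), r) := pvTakeLineR rest
      ((c :: l, if e = 0 then (if PySem.Chars.isspace c then 0 else 1) else e + 1), r)

-- termination facts for the cursor scan: the part after the newline is shorter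
theorem pvTakeLine_some_lt (s l r : List Char) (h : pvTakeLine s = (l, some r)) :
    r.length < s.length := by
  induction s generalizing l r with
  | nil => simp [pvTakeLine] at h
  | cons c rest ih =>
    by_cases hc : c = '\n'
    · simp [pvTakeLine, hc] at h
      simp [h.2.symm]
    · simp only [pvTakeLine, if_neg hc] at h
      rcases hr : pvTakeLine rest with ⟨l', r'⟩
      rw [hr] at h
      simp at h
      have := ih l' r (by rw [hr, h.2])
      simp; omega

theorem pvTakeLineR_some_lt (s r : List Char) (p : List Char × Nat)
    (h : pvTakeLineR s = (p, some r)) : r.length < s.length := by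
  induction s generalizing p r with
  | nil => simp [pvTakeLineR] at h
  | cons c rest ih =>
    by_cases hc : c = '\n'
    · simp [pvTakeLineR, hc] at h
      simp [h.2.symm]
    · simp only [pvTakeLineR, if_neg hc] at h
      rcases hr : pvTakeLineR rest with ⟨⟨l', e'⟩, r'⟩
      rw [hr] at h
      simp at h
      have := ih r (l', e') (by rw [hr, h.2])
      simp; omega

-- B's main cursor loop: one line is consumed per recursive step
def pvScan (s : List Char) : List Char :=
  let i := pvSkipLead s
  if PySem.Chars.startswith (s.drop i) ("@.claude/".toList) then
    match h : pvTakeLineR (s.drop i) with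
    | ((content, e), some rest) =>
      List.replicate i ' ' ++ ("Include ".toList) ++ content.take e ++ '\n' :: pvScan rest
    | ((content, e), none) =>
      List.replicate i ' ' ++ ("Include ".toList) ++ content.take e
  else
    match h : pvTakeLine s with
    | (content, some rest) => content ++ '\n' :: pvScan rest
    | (content, none) => content
termination_by s.length
decreasing_by
  · have := pvTakeLineR_some_lt (s.drop i) rest (content, e) h
    have h2 : (s.drop i).length ≤ s.length := by simp
    omega
  · exact lt_of_lt_of_le (pvTakeLine_some_lt s _ rest h) le_rfl

def adapt_context_references_py_alt (body : String) : String :=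
  String.ofList (pvScan body.toList)

-- ===== PRECONDITION & SPEC =====
def Spec_adapt_context_references_py (body : String) (out : String) : Prop := out = adapt_context_references_py_alt body
instance (body : String) (out : String) : Decidable (Spec_adapt_context_references_py body out) := by unfold Spec_adapt_context_references_py; infer_instance

-- ===== CLAIM (what is proved, stated in full; the proofs are below) =====
def Claim_equal_adapt_context_references_py : Prop := ∀ (body : String), Dom_adapt_context_references_py body → Spec_adapt_context_references_py body (adapt_context_references_py body)

-- ===== LEMMAS AND PROOFS =====

-- -------- facts about B's whitespace / line loops --------

theorem pvSkipLead_no_nl (a : List Char) (h : '\n' ∉ a) :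
    pvSkipLead a = (a.takeWhile PySem.Chars.isspace).length := by
  induction a with
  | nil => rfl
  | cons c rest ih =>
    simp only [List.mem_cons, not_or] at h
    have hc : (c != '\n') = true := by
      simp only [bne_iff_ne, ne_eq]
      exact fun e => h.1 e.symm
    by_cases hs : PySem.Chars.isspace c <;>
      simp [pvSkipLead, hc, hs, ih h.2]

theorem pvSkipLead_append (a b : List Char) (h : '\n' ∉ a) :
    pvSkipLead (a ++ '\n' :: b) = (a.takeWhile PySem.Chars.isspace).length := by
  induction a with
  | nil => simp [pvSkipLead]
  | cons c rest ih =>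
    simp only [List.mem_cons, not_or] at h
    have hc : (c != '\n') = true := by
      simp only [bne_iff_ne, ne_eq]
      exact fun e => h.1 e.symm
    by_cases hs : PySem.Chars.isspace c <;>
      simp [pvSkipLead, hc, hs, ih h.2]

theorem pvDropTakeWhileLen (l : List Char) (p : Char → Bool) :
    l.drop (l.takeWhile p).length = l.dropWhile p := by
  induction l with
  | nil => rfl
  | cons c rest ih =>
    by_cases hp : p c <;> simp [hp, ih]

theorem pvStartswithAppendNl (d b p : List Char) (hp : '\n' ∉ p) :
    PySem.Chars.startswith (d ++ '\n' :: b) p = PySem.Chars.startswith d p := by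
  rw [Bool.eq_iff_iff, PySem.Chars.startswith_iff, PySem.Chars.startswith_iff]
  constructor
  · intro hpre
    rcases Nat.lt_or_ge d.length p.length with hlt | hle
    · exfalso
      obtain ⟨t, ht⟩ := hpre
      have h1 : (p ++ t)[d.length]? = some '\n' := by
        rw [ht]
        rw [List.getElem?_append_right le_rfl]
        simp
      rw [List.getElem?_append_left hlt] at h1
      exact hp (List.mem_of_getElem? h1)
    · have ht := List.prefix_iff_eq_take.mp hpre
      rw [List.take_append_of_le_length hle] at ht
      exact ht ▸ List.take_prefix _ _
  · exact fun hpre => hpre.trans (List.prefix_append d ('\n' :: b))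

theorem pvTakeLine_no_nl (s : List Char) (h : '\n' ∉ s) : pvTakeLine s = (s, none) := by
  induction s with
  | nil => rfl
  | cons c rest ih =>
    simp only [List.mem_cons, not_or] at h
    have hc : c ≠ '\n' := fun e => h.1 e.symm
    simp [pvTakeLine, hc, ih h.2]

theorem pvTakeLine_append (a b : List Char) (h : '\n' ∉ a) :
    pvTakeLine (a ++ '\n' :: b) = (a, some b) := by
  induction a with
  | nil => simp [pvTakeLine]
  | cons c rest ih =>
    simp only [List.mem_cons, not_or] at h
    have hc : c ≠ '\n' := fun e => h.1 e.symm
    simp [pvTakeLine, hc, ih h.2]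

-- -------- the rstrip recurrence B's e-counter follows --------

theorem pvRstripCons (c : Char) (rest : List Char) :
    PySem.Chars.rstrip (c :: rest) =
      if PySem.Chars.rstrip rest = [] then (if PySem.Chars.isspace c then [] else [c])
      else c :: PySem.Chars.rstrip rest := by
  unfold PySem.Chars.rstrip
  rw [List.reverse_cons, List.dropWhile_append]
  by_cases he : List.dropWhile PySem.Chars.isspace rest.reverse = [] <;>
    by_cases hs : PySem.Chars.isspace c <;>
      simp [he, hs]

theorem pvTakeLineR_no_nl (d : List Char) (h : '\n' ∉ d) :
    pvTakeLineR d = ((d, (PySem.Chars.rstrip d).length), none) := by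
  induction d with
  | nil => rfl
  | cons c rest ih =>
    simp only [List.mem_cons, not_or] at h
    have hc : c ≠ '\n' := fun e => h.1 e.symm
    rw [pvRstripCons]
    by_cases he : PySem.Chars.rstrip rest = [] <;>
      by_cases hs : PySem.Chars.isspace c <;>
        simp [pvTakeLineR, hc, hs, he, ih h.2, List.length_eq_zero_iff]

theorem pvTakeLineR_append (d b : List Char) (h : '\n' ∉ d) :
    pvTakeLineR (d ++ '\n' :: b) = ((d, (PySem.Chars.rstrip d).length), some b) := by
  induction d with
  | nil => simp [pvTakeLineR, PySem.Chars.rstrip]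
  | cons c rest ih =>
    simp only [List.mem_cons, not_or] at h
    have hc : c ≠ '\n' := fun e => h.1 e.symm
    rw [pvRstripCons]
    by_cases he : PySem.Chars.rstrip rest = [] <;>
      by_cases hs : PySem.Chars.isspace c <;>
        simp [pvTakeLineR, hc, hs, he, ih h.2, List.length_eq_zero_iff]

theorem pvRstripPrefix (d : List Char) : PySem.Chars.rstrip d <+: d := by
  unfold PySem.Chars.rstrip
  simpa using (List.dropWhile_suffix (l := d.reverse) PySem.Chars.isspace).reverse

theorem pvTakeRstrip (d : List Char) :
    d.take ((PySem.Chars.rstrip d).length) = PySem.Chars.rstrip d :=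
  (List.prefix_iff_eq_take.mp (pvRstripPrefix d)).symm

-- -------- characterization of A's body.split('\n') --------

theorem pvGoAcc (fuel : Nat) (l cur : List Char) (acc : List (List Char)) :
    PySem.Chars.splitOn.go ['\n'] fuel l cur acc =
      acc.reverse ++ PySem.Chars.splitOn.go ['\n'] fuel l cur [] := by
  induction fuel generalizing l cur acc with
  | zero => simp [PySem.Chars.splitOn.go]
  | succ f ih =>
    cases l with
    | nil => simp [PySem.Chars.splitOn.go]
    | cons c rest =>
      rw [PySem.Chars.splitOn.go, PySem.Chars.splitOn.go]
      split_ifs with hpre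
      · rw [ih _ _ (cur.reverse :: acc), ih _ _ [cur.reverse]]
        simp
      · exact ih _ _ acc

theorem pvGoNoNl (l : List Char) (h : '\n' ∉ l) (fuel : Nat) (cur : List Char)
    (acc : List (List Char)) :
    PySem.Chars.splitOn.go ['\n'] fuel l cur acc = acc.reverse ++ [cur.reverse ++ l] := by
  induction l generalizing fuel cur with
  | nil => cases fuel <;> simp [PySem.Chars.splitOn.go]
  | cons c rest ih =>
    simp only [List.mem_cons, not_or] at h
    have hc : c ≠ '\n' := fun e => h.1 e.symm
    cases fuel with
    | zero => simp [PySem.Chars.splitOn.go]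
    | succ f =>
      rw [PySem.Chars.splitOn.go]
      have hpre : ['\n'].isPrefixOf (c :: rest) = false := by
        simp [List.isPrefixOf]
        exact fun e => hc e.symm
      rw [if_neg (by simp [hpre])]
      rw [ih h.2 f (c :: cur)]
      simp

theorem pvGoAppend (a : List Char) (h : '\n' ∉ a) (b : List Char) (fuel : Nat)
    (cur : List Char) (acc : List (List Char)) (hf : a.length + 1 ≤ fuel) :
    PySem.Chars.splitOn.go ['\n'] fuel (a ++ '\n' :: b) cur acc =
      PySem.Chars.splitOn.go ['\n'] (fuel - (a.length + 1)) b [] ((cur.reverse ++ a) :: acc) := by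
  induction a generalizing fuel cur with
  | nil =>
    cases fuel with
    | zero => omega
    | succ f =>
      simp only [List.nil_append]
      rw [PySem.Chars.splitOn.go]
      rw [if_pos (by simp [List.isPrefixOf])]
      simp
  | cons c rest ih =>
    simp only [List.mem_cons, not_or] at h
    have hc : c ≠ '\n' := fun e => h.1 e.symm
    cases fuel with
    | zero => simp at hf
    | succ f =>
      simp only [List.cons_append]
      rw [PySem.Chars.splitOn.go]
      have hpre : ['\n'].isPrefixOf (c :: (rest ++ '\n' :: b)) = false := by
        simp [List.isPrefixOf]
        exact fun e => hc e.symm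
      rw [if_neg (by simp [hpre])]
      rw [ih h.2 f (c :: cur) (by simp at hf ⊢; omega)]
      simp

theorem pvSplitOnNoNl (s : List Char) (h : '\n' ∉ s) :
    PySem.Chars.splitOn s ("\n".toList) = [s] := by
  show PySem.Chars.splitOn.go ['\n'] (s.length + 1) s [] [] = [s]
  rw [pvGoNoNl s h]
  simp

theorem pvSplitOnAppend (a b : List Char) (h : '\n' ∉ a) :
    PySem.Chars.splitOn (a ++ '\n' :: b) ("\n".toList) =
      a :: PySem.Chars.splitOn b ("\n".toList) := by
  show PySem.Chars.splitOn.go ['\n'] ((a ++ '\n' :: b).length + 1) (a ++ '\n' :: b) [] [] = _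
  rw [pvGoAppend a h b _ [] [] (by simp)]
  have hlen : (a ++ '\n' :: b).length + 1 - (a.length + 1) = b.length + 1 := by
    simp
  rw [hlen, pvGoAcc]
  show _ = a :: PySem.Chars.splitOn.go ['\n'] (b.length + 1) b [] []
  simp

theorem pvSplitFirst (s : List Char) (h : '\n' ∈ s) :
    ∃ a b, s = a ++ '\n' :: b ∧ '\n' ∉ a := by
  induction s with
  | nil => simp at h
  | cons c rest ih =>
    by_cases hc : c = '\n'
    · exact ⟨[], rest, by simp [hc], by simp⟩
    · have hr : '\n' ∈ rest := by
        rcases List.mem_cons.mp h with h1 | h1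
        · exact absurd h1.symm hc
        · exact h1
      obtain ⟨a, b, rfl, ha⟩ := ih hr
      exact ⟨c :: a, b, rfl, by
        simp only [List.mem_cons, not_or]
        exact ⟨fun e => hc e.symm, ha⟩⟩

theorem pvSplitOnNeNil (s : List Char) : PySem.Chars.splitOn s ("\n".toList) ≠ [] := by
  by_cases h : '\n' ∈ s
  · obtain ⟨a, b, rfl, ha⟩ := pvSplitFirst s h
    rw [pvSplitOnAppend a b ha]
    simp
  · rw [pvSplitOnNoNl s h]
    simp

-- -------- the per-line identity between A's branch and B's branch --------

theorem pvNotInclude (s : List Char) (h : PySem.Chars.startswith s ("@.claude/".toList) = true) :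
    PySem.Chars.startswith s ("Include @".toList) = false := by
  unfold PySem.Chars.startswith at *
  rw [List.isPrefixOf_iff_prefix] at h
  obtain ⟨t, ht⟩ := h
  rw [← ht]
  simp [List.isPrefixOf]

theorem pvStartswithRstrip (cs : List Char) :
    PySem.Chars.startswith (PySem.Chars.rstrip cs) ("@.claude/".toList) =
    PySem.Chars.startswith cs ("@.claude/".toList) := by
  unfold PySem.Chars.startswith
  rw [Bool.eq_iff_iff, List.isPrefixOf_iff_prefix, List.isPrefixOf_iff_prefix]
  constructor
  · intro h
    exact h.trans (pvRstripPrefix cs)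
  · rintro ⟨t, rfl⟩
    unfold PySem.Chars.rstrip
    rw [List.reverse_append, List.dropWhile_append]
    split
    · rw [show List.dropWhile PySem.Chars.isspace ("@.claude/".toList).reverse =
          ("@.claude/".toList).reverse from by decide]
      simp
    · rw [List.reverse_append, List.reverse_reverse]
      exact ⟨_, rfl⟩

theorem pvLineA_eq (line : List Char) :
    pvAdaptLineA line =
      if PySem.Chars.startswith (line.dropWhile PySem.Chars.isspace) ("@.claude/".toList) = true then
        List.replicate (line.takeWhile PySem.Chars.isspace).length ' ' ++ ("Include ".toList) ++
          PySem.Chars.rstrip (line.dropWhile PySem.Chars.isspace)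
      else line := by
  have hstrip : PySem.Chars.strip line =
      PySem.Chars.rstrip (line.dropWhile PySem.Chars.isspace) := rfl
  have hind : line.length - (PySem.Chars.lstrip line).length =
      (line.takeWhile PySem.Chars.isspace).length := by
    unfold PySem.Chars.lstrip
    have : (List.takeWhile PySem.Chars.isspace line).length +
        (List.dropWhile PySem.Chars.isspace line).length = line.length := by
      rw [← List.length_append, List.takeWhile_append_dropWhile]
    omega
  by_cases hc : PySem.Chars.startswith (line.dropWhile PySem.Chars.isspace)
      ("@.claude/".toList) = true
  · have hA : PySem.Chars.startswith (PySem.Chars.strip line) ("@.claude/".toList) = true := by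
      rw [hstrip, pvStartswithRstrip]
      exact hc
    have hI := pvNotInclude _ hA
    rw [pvAdaptLineA, if_pos hc]
    rw [if_pos (by rw [hA, hI]; rfl)]
    rw [hstrip, hind]
  · have hA : PySem.Chars.startswith (PySem.Chars.strip line) ("@.claude/".toList) = false := by
      rw [hstrip, pvStartswithRstrip]
      exact eq_false_of_ne_true hc
    rw [pvAdaptLineA, if_neg hc, if_neg (by rw [hA]; simp)]

-- -------- the main correspondence: B's cursor scan = A's split/map/join --------

theorem pvScan_eq (s : List Char) :
    pvScan s = PySem.Chars.join ("\n".toList)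
      ((PySem.Chars.splitOn s ("\n".toList)).map pvAdaptLineA) := by
  by_cases hmem : '\n' ∈ s
  · obtain ⟨a, b, hs, ha⟩ := pvSplitFirst s hmem
    have hlt : b.length < s.length := by
      rw [hs]; simp only [List.length_append, List.length_cons]; omega
    have hb : pvScan b = PySem.Chars.join ("\n".toList)
        ((PySem.Chars.splitOn b ("\n".toList)).map pvAdaptLineA) := pvScan_eq b
    subst hs
    have hd : '\n' ∉ a.dropWhile PySem.Chars.isspace :=
      fun hx => ha ((List.dropWhile_sublist _).subset hx)
    have hskip := pvSkipLead_append a b ha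
    have hdrop : (a ++ '\n' :: b).drop (pvSkipLead (a ++ '\n' :: b)) =
        a.dropWhile PySem.Chars.isspace ++ '\n' :: b := by
      rw [hskip, List.drop_append_of_le_length (List.takeWhile_prefix _).length_le,
        pvDropTakeWhileLen]
    rw [pvScan, hdrop, pvSplitOnAppend a b ha, List.map_cons]
    rcases hsp : (PySem.Chars.splitOn b ("\n".toList)).map pvAdaptLineA with _ | ⟨y, t⟩
    · exact absurd (List.map_eq_nil_iff.mp hsp) (pvSplitOnNeNil b)
    · rw [PySem.Chars.join_cons_cons, ← hsp, ← hb]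
      rw [pvStartswithAppendNl _ _ _ (by decide), pvLineA_eq a]
      by_cases hc : PySem.Chars.startswith (a.dropWhile PySem.Chars.isspace)
          ("@.claude/".toList) = true
      · rw [if_pos hc, if_pos hc, pvTakeLineR_append _ b hd]
        simp only [hskip]
        simp [pvTakeRstrip]
      · rw [if_neg hc, if_neg hc, pvTakeLine_append a b ha]
        simp
  · rw [pvSplitOnNoNl s hmem, List.map_cons, List.map_nil, PySem.Chars.join_singleton]
    have hd : '\n' ∉ s.dropWhile PySem.Chars.isspace :=
      fun hx => hmem ((List.dropWhile_sublist _).subset hx)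
    have hskip := pvSkipLead_no_nl s hmem
    have hdrop : s.drop (pvSkipLead s) = s.dropWhile PySem.Chars.isspace := by
      rw [hskip, pvDropTakeWhileLen]
    rw [pvScan, hdrop, pvLineA_eq s]
    by_cases hc : PySem.Chars.startswith (s.dropWhile PySem.Chars.isspace)
        ("@.claude/".toList) = true
    · rw [if_pos hc, if_pos hc, pvTakeLineR_no_nl _ hd]
      simp only [hskip]
      simp [pvTakeRstrip]
    · rw [if_neg hc, if_neg hc, pvTakeLine_no_nl s hmem]
termination_by s.length
decreasing_by exact hlt

-- ===== VERDICT (by name: the statement is the Claim_ definition above) =====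
theorem adapt_context_references_py_spec : Claim_equal_adapt_context_references_py := by
  intro body _
  unfold Spec_adapt_context_references_py adapt_context_references_py adapt_context_references_py_alt
  simp only [PySem.List.foldl_append_singleton_eq_map, List.nil_append, pvScan_eq]
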